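-- pv_equiv track=rewrite | github.com/fsfw-dresden/schulstick-tutorial-docs | src/vision_assistant/vision.py | _get_scale_factor
-- ===== SOURCE A (Python) =====
-- def _get_scale_factor(width: int, height: int) -> int:
--     """Determine optimal scaling factor for high resolution displays"""
--     target_width = 1920  # Target width for reasonable resolution
--
--     if width <= target_width:
--         return 1
--
--     # Find the smallest factor (2, 3, or 4) that gets us close to target
--     for factor in [2, 3, 4]:
--         if width / factor <= target_width:
--             return factor
--
--     return 4  # Max scale factor if still too large
-- ===== SOURCE B (Python) =====
-- def _get_scale_factor(width: int, height: int) -> int: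
--     """Closed form: smallest factor with width/factor <= 1920, clamped to [1, 4]."""
--     return max(1, min(4, -(-width // 1920)))
-- ===== Notes on version B (the rewrite author's own statement) =====
-- stated objective: simpler
-- what changed: Replaces the guard plus the linear scan over candidate factors [2,3,4] with a single closed-form expression: ceiling division of width by 1920 clamped to [1,4].
import Mathlib
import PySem

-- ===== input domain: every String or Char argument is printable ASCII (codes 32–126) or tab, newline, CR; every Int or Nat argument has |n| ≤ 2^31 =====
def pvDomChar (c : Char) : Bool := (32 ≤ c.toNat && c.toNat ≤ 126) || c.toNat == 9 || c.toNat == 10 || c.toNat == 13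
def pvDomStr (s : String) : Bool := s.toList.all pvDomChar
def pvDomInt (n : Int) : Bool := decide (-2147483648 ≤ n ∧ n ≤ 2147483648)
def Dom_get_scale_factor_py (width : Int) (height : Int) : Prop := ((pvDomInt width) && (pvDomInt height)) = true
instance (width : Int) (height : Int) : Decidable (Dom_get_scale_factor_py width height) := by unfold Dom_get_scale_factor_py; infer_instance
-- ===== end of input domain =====

-- B replaces A's guard-plus-scan over [2,3,4] with one closed-form clamped ceiling division (objective: simpler).


-- ===== PORT A =====
-- A's for-loop over the literal list [2, 3, 4], returning the first factor whose test passes.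
-- Python's float test `width / factor <= 1920` is ported as the exact integer test `width ≤ 1920 * factor`:
-- for |width| ≤ 2^31 and factor ∈ {2,3,4} the float comparison agrees with it exactly.
def getScaleFactorLoop (width : Int) (factors : List Int) : Int :=
  match factors with
  | [] => 4
  | f :: rest => if width ≤ 1920 * f then f else getScaleFactorLoop width rest

def get_scale_factor_py (width : Int) (height : Int) : Int :=
  if width ≤ 1920 then 1
  else getScaleFactorLoop width [2, 3, 4]

-- ===== PORT B =====
-- Source B: return max(1, min(4, -(-width // 1920)))
def get_scale_factor_py_alt (width : Int) (height : Int) : Int :=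
  max 1 (min 4 (-(PySem.Int.floordiv (-width) 1920)))

-- ===== PRECONDITION & SPEC =====
def Spec_get_scale_factor_py (width : Int) (height : Int) (out : Int) : Prop := out = get_scale_factor_py_alt width height
instance (width : Int) (height : Int) (out : Int) : Decidable (Spec_get_scale_factor_py width height out) := by unfold Spec_get_scale_factor_py; infer_instance

-- ===== CLAIM (what is proved, stated in full; the proofs are below) =====
def Claim_equal_get_scale_factor_py : Prop := ∀ (width : Int) (height : Int), Dom_get_scale_factor_py width height → Spec_get_scale_factor_py width height (get_scale_factor_py width height)

-- ===== LEMMAS AND PROOFS =====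

-- ===== VERDICT (by name: the statement is the Claim_ definition above) =====
theorem get_scale_factor_py_spec : Claim_equal_get_scale_factor_py := by
  intro width height _
  unfold Spec_get_scale_factor_py get_scale_factor_py get_scale_factor_py_alt
  simp only [getScaleFactorLoop, PySem.Int.floordiv]
  have h : (-width).fdiv 1920 = (-width) / 1920 := by
    rw [Int.fdiv_eq_ediv_of_nonneg _ (by norm_num)]
  rw [h]
  split_ifs <;> omega
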